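-- pv_equiv track=rewrite | github.com/llewnoiz/fast-api | A14-perf/src/perfdeep/algorithm_complexity.py | count_naive
-- ===== SOURCE A (Python) =====
-- def count_naive(items: list[str]) -> dict[str, int]:
--     """O(n) but key not in dict _두 번 lookup_."""
--     counts: dict[str, int] = {}
--     for item in items:
--         if item in counts:
--             counts[item] += 1
--         else:
--             counts[item] = 1
--     return counts
-- ===== SOURCE B (Python) =====
-- def count_naive(items: list[str]) -> dict[str, int]:
--     srt = sorted(items)
--     runs: dict[str, int] = {}
--     i = 0
--     while i < len(srt):
--         j = i + 1
--         while j < len(srt) and srt[j] == srt[i]: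
--             j += 1
--         runs[srt[i]] = j - i
--         i = j
--     return {item: runs[item] for item in dict.fromkeys(items)}
-- ===== Notes on version B (the rewrite author's own statement) =====
-- stated objective: alternative
-- what changed: Replaced the incremental dict-with-membership-test counting loop by a sort-then-count-runs pass (run lengths of the sorted copy), emitted in first-appearance key order via dict.fromkeys.
import Mathlib
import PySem

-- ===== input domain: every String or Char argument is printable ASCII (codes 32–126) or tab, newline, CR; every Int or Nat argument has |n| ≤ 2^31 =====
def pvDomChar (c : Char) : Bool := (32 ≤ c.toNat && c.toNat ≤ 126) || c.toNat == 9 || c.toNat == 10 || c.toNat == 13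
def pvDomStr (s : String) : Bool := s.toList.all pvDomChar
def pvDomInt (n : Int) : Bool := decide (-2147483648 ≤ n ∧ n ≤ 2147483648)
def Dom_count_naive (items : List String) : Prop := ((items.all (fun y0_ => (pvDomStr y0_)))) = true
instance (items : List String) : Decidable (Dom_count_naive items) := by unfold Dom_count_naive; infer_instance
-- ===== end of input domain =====

-- B replaces A's incremental dict-counting loop by sort-then-count-runs, emitted in first-appearance key order.
-- ===== PORT A =====
def count_naive (items : List String) : List (String × Int) :=
  (items.foldl
    (fun counts item =>
      if counts.contains item then counts.insert item (counts.getD item 0 + 1)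
      else counts.insert item 1)
    (PySem.Dict.empty : PySem.Dict String Int)).items

-- ===== PORT B =====
-- the inner while loop of Source B: advance j past the run of srt[i] (indices stay non-negative, so they are Nat)
def innerJ (srt : List String) (x : String) (j : Nat) : Nat :=
  if j < srt.length ∧ srt[j]! == x then innerJ srt x (j + 1) else j
termination_by srt.length - j
decreasing_by omega

-- termination helper for the outer loop: the inner loop never moves j backwards
lemma le_innerJ (srt : List String) (x : String) (j : Nat) : j ≤ innerJ srt x j := by
  induction j using innerJ.induct srt x with
  | case1 j h ih => rw [innerJ, if_pos h]; omega
  | case2 j h => rw [innerJ, if_neg h]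

-- the outer while loop of Source B
def outerLoop (srt : List String) (i : Nat) (runs : PySem.Dict String Int) : PySem.Dict String Int :=
  if _h : i < srt.length then
    let j := innerJ srt srt[i]! (i + 1)
    outerLoop srt j (runs.insert srt[i]! ((j : Int) - (i : Int)))
  else runs
termination_by srt.length - i
decreasing_by
  have := le_innerJ srt srt[i]! (i + 1)
  omega

-- Source B's runs[item] is ported as getD with default 0: the key is always present (item ∈ items ⇒ item ∈ sorted items)
def count_naive_alt (items : List String) : List (String × Int) :=
  let runs := outerLoop (PySem.List.sorted items (fun x => x) false) 0 PySem.Dict.empty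
  (PySem.List.dedup items).map (fun item => (item, runs.getD item 0))

-- ===== PRECONDITION & SPEC =====
def Spec_count_naive (items : List String) (out : List (String × Int)) : Prop := out = count_naive_alt items
instance (items : List String) (out : List (String × Int)) : Decidable (Spec_count_naive items out) := by unfold Spec_count_naive; infer_instance

-- ===== CLAIM (what is proved, stated in full; the proofs are below) =====
def Claim_equal_count_naive : Prop := ∀ (items : List String), Dom_count_naive items → Spec_count_naive items (count_naive items)

-- ===== LEMMAS AND PROOFS =====

-- proof-side bridge: the index loops of B peel the sorted list run by run
def runLoop : List String → PySem.Dict String Int → PySem.Dict String Int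
  | [], runs => runs
  | x :: t, runs =>
      runLoop (t.dropWhile (fun y => y == x))
        (runs.insert x (((1 + (t.takeWhile (fun y => y == x)).length : Nat) : Int)))
termination_by l _ => l.length
decreasing_by exact Nat.lt_succ_of_le (List.length_dropWhile_le _ _)

lemma dropWhile_eq_drop_length_takeWhile (p : String → Bool) (l : List String) :
    l.dropWhile p = l.drop (l.takeWhile p).length := by
  induction l with
  | nil => simp
  | cons a t ih => by_cases h : p a <;> simp [h, ih]

-- the inner loop counts the run of x starting at index j
lemma innerJ_eq (srt : List String) (x : String) (j : Nat) :
    innerJ srt x j = j + ((srt.drop j).takeWhile (fun y => y == x)).length := by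
  induction j using innerJ.induct srt x with
  | case1 j h ih =>
    rw [innerJ, if_pos h]
    obtain ⟨hj, hx⟩ := h
    rw [← List.getElem_cons_drop hj] at *
    simp only [List.takeWhile_cons]
    rw [List.getElem!_eq_getElem?_getD, List.getElem?_eq_getElem hj] at hx
    simp only [Option.getD_some] at hx
    simp only [hx, if_true, List.length_cons] at *
    omega
  | case2 j h =>
    rw [innerJ, if_neg h]
    rcases Nat.lt_or_ge j srt.length with hj | hj
    · have hx : (srt[j]! == x) = false := by
        by_contra hc
        exact h ⟨hj, by simpa using hc⟩
      rw [← List.getElem_cons_drop hj]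
      rw [List.getElem!_eq_getElem?_getD, List.getElem?_eq_getElem hj] at hx
      simp only [Option.getD_some] at hx
      simp [hx]
    · simp [List.drop_eq_nil_of_le hj]

-- the outer index loop is the run-peeling loop on the remaining suffix
lemma outerLoop_eq_runLoop (srt : List String) (i : Nat) (d : PySem.Dict String Int) :
    outerLoop srt i d = runLoop (srt.drop i) d := by
  induction i, d using outerLoop.induct srt with
  | case1 i d h j ih =>
    rw [outerLoop, dif_pos h, ih]
    rw [← List.getElem_cons_drop h]
    rw [runLoop]
    have hJ := innerJ_eq srt srt[i]! (i + 1)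
    have hget : srt[i]! = srt[i] := by
      rw [List.getElem!_eq_getElem?_getD, List.getElem?_eq_getElem h]; rfl
    have hdrop : srt.drop (innerJ srt srt[i]! (i + 1)) =
        (srt.drop (i + 1)).dropWhile (fun y => y == srt[i]!) := by
      rw [hJ, dropWhile_eq_drop_length_takeWhile, ← List.drop_drop]
      try congr 1
      try omega
    rw [hdrop]
    try rw [hget]
    congr 2
    have hjd : j = i + 1 + ((srt.drop (i + 1)).takeWhile (fun y => y == srt[i]!)).length := hJ
    rw [hjd, hget]
    push_cast
    ring
  | case2 i d h =>
    rw [outerLoop, dif_neg h]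
    rw [List.drop_eq_nil_of_le (by omega), runLoop]

-- on a sorted list the run loop's dictionary holds the full multiplicity of every key it has seen
lemma runLoop_getD (l : List String) (d : PySem.Dict String Int) (k : String)
    (hs : l.Pairwise (· ≤ ·)) :
    (runLoop l d).getD k 0 = if k ∈ l then (l.count k : Int) else d.getD k 0 := by
  induction l, d using runLoop.induct with
  | case1 d => simp [runLoop]
  | case2 x t d ih =>
    have hs1 : ∀ y ∈ t, x ≤ y := (List.pairwise_cons.mp hs).1
    have hst : t.Pairwise (· ≤ ·) := (List.pairwise_cons.mp hs).2
    have hsr : (t.dropWhile (fun y => y == x)).Pairwise (· ≤ ·) :=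
      hst.sublist (List.dropWhile_sublist _)
    have htd : t.takeWhile (fun y => y == x) ++ t.dropWhile (fun y => y == x) = t :=
      List.takeWhile_append_dropWhile
    have htk : ∀ y ∈ t.takeWhile (fun y => y == x), y = x := by
      intro y hy
      exact eq_of_beq (List.mem_takeWhile_imp (p := fun y => y == x) hy)
    -- every element of the dropped suffix differs from x (the run is over)
    have hxr : x ∉ t.dropWhile (fun y => y == x) := by
      intro hx
      cases hr : t.dropWhile (fun y => y == x) with
      | nil => rw [hr] at hx; exact absurd hx List.not_mem_nil
      | cons y r' =>
        have hne : t.dropWhile (fun y => y == x) ≠ [] := by rw [hr]; simp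
        have hpy := List.head_dropWhile_not (fun y => y == x) hne
        have hyx : y ≠ x := by
          have : (t.dropWhile (fun y => y == x)).head hne = y := by
            rw [List.head_eq_iff_head?_eq_some hne, hr]; rfl
          rw [this] at hpy
          simpa using hpy
        have hyt : y ∈ t := (List.dropWhile_sublist _).mem (by rw [hr]; exact List.mem_cons_self)
        rw [hr] at hx
        rcases List.mem_cons.mp hx with h | h
        · exact hyx h.symm
        · have hyz := (List.pairwise_cons.mp (hr ▸ hsr)).1 x h
          exact hyx (le_antisymm hyz (hs1 y hyt))
    have hcr : (t.dropWhile (fun y => y == x)).count x = 0 := List.count_eq_zero.mpr hxr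
    have hsplit : ∀ k', List.count k' t =
        List.count k' (t.takeWhile (fun y => y == x)) +
        List.count k' (t.dropWhile (fun y => y == x)) := by
      intro k'
      conv_lhs => rw [← htd]
      rw [List.count_append]
    have hck : ∀ k', k' ≠ x → (x :: t).count k' = (t.dropWhile (fun y => y == x)).count k' := by
      intro k' hk'
      have h0 : List.count k' (t.takeWhile (fun y => y == x)) = 0 :=
        List.count_eq_zero.mpr (fun h => hk' (htk _ h))
      simp [hsplit k', h0, Ne.symm hk']
    have hcx : (x :: t).count x = 1 + (t.takeWhile (fun y => y == x)).length := by
      have hq : List.count x (t.takeWhile (fun y => y == x)) =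
          (t.takeWhile (fun y => y == x)).length :=
        List.count_eq_length.mpr (fun b hb => (htk b hb).symm)
      simp [hsplit x, hq, hcr]
      omega
    rw [runLoop, ih hsr]
    by_cases hk : k = x
    · subst hk
      simp [hxr, hcx]
    · have hmem : k ∈ x :: t ↔ k ∈ t.dropWhile (fun y => y == x) := by
        constructor
        · intro h
          rcases List.mem_cons.mp h with h | h
          · exact absurd h hk
          · rw [← htd] at h
            rcases List.mem_append.mp h with h | h
            · exact absurd (htk _ h) hk
            · exact h
        · intro h
          exact List.mem_cons_of_mem _ ((List.dropWhile_sublist _).mem h)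
      rw [PySem.Dict.getD_insert]
      simp only [hk, if_false]
      by_cases hin : k ∈ t.dropWhile (fun y => y == x)
      · simp [hin, hmem.mpr hin, hck k hk]
      · have hnot : k ∉ x :: t := fun h => hin (hmem.mp h)
        simp [hin, hnot]

-- ===== VERDICT (by name: the statement is the Claim_ definition above) =====
theorem count_naive_spec : Claim_equal_count_naive := by
  intro items _
  unfold Spec_count_naive count_naive count_naive_alt
  have hcongr := PySem.List.foldl_congr_mem (l := items)
    (init := (PySem.Dict.empty : PySem.Dict String Int))
    (f := fun counts item =>
      if counts.contains item then counts.insert item (counts.getD item 0 + 1)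
      else counts.insert item 1)
    (g := fun d x => d.insert x (d.getD x 0 + 1))
    (by
      intro acc x _
      by_cases h : acc.contains x = true
      · simp [h]
      · simp only [Bool.not_eq_true] at h
        simp [h, PySem.Dict.getD_of_not_contains (h := h)])
  rw [hcongr, PySem.Dict.foldl_insert_getD_add_one_eq_counter, PySem.Dict.items_counter]
  simp only
  apply List.map_congr_left
  intro k hk
  have hk' : k ∈ items := (PySem.List.mem_dedup items k).mp hk
  have hks : k ∈ PySem.List.sorted items (fun x => x) false :=
    (PySem.List.sorted_perm items (fun x => x) false).mem_iff.mpr hk'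
  have hpw : (PySem.List.sorted items (fun x => x) false).Pairwise (· ≤ ·) := by
    have := PySem.List.sorted_pairwise items (fun x => x)
    simpa using this
  rw [outerLoop_eq_runLoop, List.drop_zero, runLoop_getD _ _ _ hpw]
  simp [hks, (PySem.List.sorted_perm items (fun x => x) false).count_eq]
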